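-- pv_equiv track=rewrite | github.com/archit342000/RAGQA | pipeline/degraded_chunker.py | _normalise_paragraph
-- ===== SOURCE A (Python) =====
-- from typing import List, Sequence
--
-- def _normalise_paragraph(text: str) -> str:
--     lines = []
--     for raw_line in text.splitlines():
--         stripped = raw_line.strip()
--         if not stripped:
--             lines.append("\n")
--             continue
--         if stripped.endswith("-") and len(stripped) > 1 and not stripped.endswith("--"):
--             stripped = stripped[:-1]
--         lines.append(stripped)
--     paragraph = []
--     buffer: List[str] = []
--     for token in lines:
--         if token == "\n":
--             if buffer:
--                 paragraph.append(" ".join(buffer))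
--                 buffer = []
--             continue
--         buffer.append(token)
--     if buffer:
--         paragraph.append(" ".join(buffer))
--     if not paragraph:
--         paragraph = [" ".join(token for token in lines if token and token != "\n")]
--     return "\n\n".join(segment for segment in paragraph if segment)
-- ===== SOURCE B (Python) =====
-- def _normalise_paragraph(text: str) -> str:
--     paragraphs = []
--     buffer = []
--     for line in text.splitlines():
--         stripped = line.strip()
--         if not stripped:
--             if buffer:
--                 paragraphs.append(" ".join(buffer))
--                 buffer = []
--             continue
--         if stripped.endswith("-") and len(stripped) > 1 and not stripped.endswith("--"):
--             stripped = stripped[:-1]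
--         buffer.append(stripped)
--     if buffer:
--         paragraphs.append(" ".join(buffer))
--     return "\n\n".join(p for p in paragraphs if p)
-- ===== Notes on version B (the rewrite author's own statement) =====
-- stated objective: simpler
-- what changed: B replaces A's two-pass pipeline (build a token list with a '\n' sentinel for blank lines, then regroup it, plus a dead fallback branch that can only yield '') with one pass over splitlines() that cleans each line and flushes a paragraph buffer on blank lines.
import Mathlib
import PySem

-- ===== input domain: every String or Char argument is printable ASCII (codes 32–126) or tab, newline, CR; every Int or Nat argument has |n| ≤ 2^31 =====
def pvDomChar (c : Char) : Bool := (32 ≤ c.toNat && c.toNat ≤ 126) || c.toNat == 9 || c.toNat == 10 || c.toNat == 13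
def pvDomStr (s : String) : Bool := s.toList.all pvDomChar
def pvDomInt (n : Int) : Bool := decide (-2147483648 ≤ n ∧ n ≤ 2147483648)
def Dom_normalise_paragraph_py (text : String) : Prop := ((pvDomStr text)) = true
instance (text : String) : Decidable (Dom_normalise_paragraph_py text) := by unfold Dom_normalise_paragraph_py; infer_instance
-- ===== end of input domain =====

-- B replaces A's two-pass pipeline (token list with a "\n" sentinel, then regrouping, plus a
-- dead fallback branch that can only produce "") by a single pass over the lines; objective: simpler.

-- ===== PORT A =====
-- first loop body of A: clean one raw line into a token ("\n" sentinel for blank lines)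
def pvCleanA (raw : String) : String :=
  let stripped := PySem.Str.strip raw
  if stripped == "" then "\n"
  else if PySem.Str.endswith stripped "-" && decide (1 < PySem.Str.len stripped)
          && !PySem.Str.endswith stripped "--" then
    PySem.Str.slice stripped none (some (-1))
  else stripped

-- second loop body of A: regroup tokens into paragraphs at the "\n" sentinels
def pvStepA (st : List String × List String) (token : String) : List String × List String :=
  if token == "\n" then
    if st.2 ≠ [] then (st.1 ++ [PySem.Str.join " " st.2], []) else st
  else (st.1, st.2 ++ [token])

def normalise_paragraph_py (text : String) : String :=
  let lines := (PySem.Str.splitlines text).foldl (fun acc raw => acc ++ [pvCleanA raw]) []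
  let st := lines.foldl pvStepA ([], [])
  let paragraph := if st.2 ≠ [] then st.1 ++ [PySem.Str.join " " st.2] else st.1
  let paragraph :=
    if paragraph = [] then
      [PySem.Str.join " " (lines.filter (fun t => !(t == "") && !(t == "\n")))]
    else paragraph
  PySem.Str.join "\n\n" (paragraph.filter (fun seg => !(seg == "")))

-- ===== PORT B =====
-- B's single loop body: strip the line; blank flushes the buffer, otherwise de-hyphenate and buffer
def pvStepB (st : List String × List String) (line : String) : List String × List String :=
  let stripped := PySem.Str.strip line
  if stripped == "" then
    if st.2 ≠ [] then (st.1 ++ [PySem.Str.join " " st.2], []) else st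
  else
    let stripped :=
      if PySem.Str.endswith stripped "-" && decide (1 < PySem.Str.len stripped)
          && !PySem.Str.endswith stripped "--" then
        PySem.Str.slice stripped none (some (-1))
      else stripped
    (st.1, st.2 ++ [stripped])

def normalise_paragraph_py_alt (text : String) : String :=
  let st := (PySem.Str.splitlines text).foldl pvStepB ([], [])
  let paragraphs := if st.2 ≠ [] then st.1 ++ [PySem.Str.join " " st.2] else st.1
  PySem.Str.join "\n\n" (paragraphs.filter (fun p => !(p == "")))

-- ===== PRECONDITION & SPEC =====
def Spec_normalise_paragraph_py (text : String) (out : String) : Prop := out = normalise_paragraph_py_alt text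
instance (text : String) (out : String) : Decidable (Spec_normalise_paragraph_py text out) := by unfold Spec_normalise_paragraph_py; infer_instance

-- ===== CLAIM (what is proved, stated in full; the proofs are below) =====
def Claim_equal_normalise_paragraph_py : Prop := ∀ (text : String), Dom_normalise_paragraph_py text → Spec_normalise_paragraph_py text (normalise_paragraph_py text)

-- ===== LEMMAS AND PROOFS =====

-- a nonempty result of strip starts with a non-whitespace character
lemma head_strip_not_space (cs : List Char) (c : Char) (r : List Char)
    (h : PySem.Chars.strip cs = c :: r) : PySem.Chars.isspace c = false := by
  unfold PySem.Chars.strip PySem.Chars.rstrip PySem.Chars.lstrip at h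
  set xs := cs.dropWhile PySem.Chars.isspace with hxs
  have h2 : xs.reverse.dropWhile PySem.Chars.isspace = (c :: r).reverse := by
    rw [← h]; simp
  have hsuf : (c :: r).reverse <:+ xs.reverse := by
    rw [← h2]; exact List.dropWhile_suffix _
  have hpre : (c :: r) <+: xs := List.reverse_suffix.mp hsuf
  obtain ⟨t, ht⟩ := hpre
  have hx : xs = c :: (r ++ t) := by simpa using ht.symm
  have := List.head?_dropWhile_not PySem.Chars.isspace cs
  rw [← hxs, hx] at this
  simpa using this

-- the cleaned token of a non-blank line is never the "\n" sentinel
lemma cleanA_ne_newline (raw : String) (h : ¬ PySem.Str.strip raw = "") :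
    (if PySem.Str.endswith (PySem.Str.strip raw) "-" && decide (1 < PySem.Str.len (PySem.Str.strip raw))
        && !PySem.Str.endswith (PySem.Str.strip raw) "--" then
      PySem.Str.slice (PySem.Str.strip raw) none (some (-1))
    else PySem.Str.strip raw) ≠ "\n" := by
  have hne : (PySem.Str.strip raw).toList ≠ [] := by
    intro hnil
    apply h
    apply String.toList_inj.mp
    simpa using hnil
  have hL : (PySem.Str.strip raw).toList = PySem.Chars.strip raw.toList := by simp
  obtain ⟨c, rest, hcr⟩ : ∃ c rest, (PySem.Str.strip raw).toList = c :: rest := by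
    cases hx : (PySem.Str.strip raw).toList with
    | nil => exact absurd hx hne
    | cons a b => exact ⟨a, b, rfl⟩
  have hns : PySem.Chars.isspace c = false :=
    head_strip_not_space raw.toList c rest (by rw [← hL, hcr])
  have hnlc : c ≠ '\n' := by
    intro hc; subst hc
    have : PySem.Chars.isspace '\n' = true := by decide
    rw [this] at hns; simp at hns
  split
  · rename_i hcond
    rw [Bool.and_eq_true, Bool.and_eq_true] at hcond
    have hlen : 1 < (PySem.Str.strip raw).toList.length := by
      have := of_decide_eq_true hcond.1.2
      simpa [PySem.Str.len_eq] using this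
    have hrest : rest ≠ [] := by
      intro hr; rw [hcr, hr] at hlen; simp at hlen
    intro habs
    have h2 : (PySem.Str.slice (PySem.Str.strip raw) none (some (-1))).toList = ['\n'] := by
      rw [habs]; decide
    rw [PySem.Str.slice_to_neg_one, hcr, List.dropLast_cons_of_ne_nil hrest] at h2
    exact hnlc (by injection h2)
  · intro habs
    rw [habs] at hcr
    have h1 : ['\n'] = c :: rest := by rw [← hcr]; decide
    exact hnlc (by injection h1 with ha hb; exact ha.symm)

-- A's first loop is a map over the lines
lemma linesA_eq_map (ls : List String) :
    ls.foldl (fun acc raw => acc ++ [pvCleanA raw]) [] = ls.map pvCleanA := by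
  simpa using PySem.List.foldl_append_singleton_eq_map pvCleanA ls []

-- one step of A's second loop on a cleaned token is one step of B's single loop on the raw line
lemma stepA_clean_eq_stepB (st : List String × List String) (l : String) :
    pvStepA st (pvCleanA l) = pvStepB st l := by
  by_cases hs : PySem.Str.strip l = ""
  · simp [pvCleanA, pvStepA, pvStepB, hs]
  · have hbeq : (PySem.Str.strip l == "") = false := by simpa using hs
    have hne := cleanA_ne_newline l hs
    simp only [pvCleanA, pvStepB, hbeq, Bool.false_eq_true, if_false, pvStepA]
    rw [if_neg (by simpa using hne)]

-- A's regrouping pass over the cleaned tokens is B's single pass over the raw lines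
lemma foldA_map_eq_foldB (ls : List String) :
    ∀ st : List String × List String,
      (ls.map pvCleanA).foldl pvStepA st = ls.foldl pvStepB st := by
  induction ls with
  | nil => intro st; rfl
  | cons l ls ih =>
    intro st
    simp only [List.map_cons, List.foldl_cons, stepA_clean_eq_stepB]
    exact ih _

-- if A's regrouping ends with no paragraph and no buffer, every token was the "\n" sentinel
lemma foldA_empty (ls : List String) :
    ∀ para buf : List String, ls.foldl pvStepA (para, buf) = ([], []) →
      para = [] ∧ buf = [] ∧ ∀ t ∈ ls, t = "\n" := by
  induction ls with
  | nil =>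
    intro para buf h
    simp only [List.foldl_nil, Prod.mk.injEq] at h
    exact ⟨h.1, h.2, by simp⟩
  | cons t ls ih =>
    intro para buf h
    simp only [List.foldl_cons] at h
    by_cases ht : t = "\n"
    · subst ht
      by_cases hb : buf = []
      · have := ih _ _ (by simpa [pvStepA, hb] using h)
        exact ⟨this.1, hb, by
          intro u hu
          rcases List.mem_cons.mp hu with hu | hu
          · exact hu
          · exact this.2.2 u hu⟩
      · have := ih _ _ (by simpa [pvStepA, hb] using h)
        exact absurd this.1 (by simp)
    · have hbne : (t == "\n") = false := by simpa using ht
      have := ih _ _ (by simpa [pvStepA, hbne] using h)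
      exact absurd this.2.1 (by simp)

-- ===== VERDICT (by name: the statement is the Claim_ definition above) =====
theorem normalise_paragraph_py_spec : Claim_equal_normalise_paragraph_py := by
  intro text _
  show normalise_paragraph_py text = normalise_paragraph_py_alt text
  unfold normalise_paragraph_py normalise_paragraph_py_alt
  simp only [linesA_eq_map, foldA_map_eq_foldB]
  set st := (PySem.Str.splitlines text).foldl pvStepB ([], []) with hst
  by_cases hb : st.2 = []
  · simp only [hb, ne_eq, not_true_eq_false, if_false]
    by_cases hp : st.1 = []
    · simp only [hp]
      have hst0 : st = ([], []) := Prod.ext_iff.mpr ⟨hp, hb⟩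
      have hfoldA : ((PySem.Str.splitlines text).map pvCleanA).foldl pvStepA ([], []) = ([], []) := by
        rw [foldA_map_eq_foldB, ← hst]; exact hst0
      have hall := foldA_empty ((PySem.Str.splitlines text).map pvCleanA) [] [] hfoldA
      have hfil : ((PySem.Str.splitlines text).map pvCleanA).filter
          (fun t => !(t == "") && !(t == "\n")) = [] := by
        rw [List.filter_eq_nil_iff]
        intro t htmem
        have := hall.2.2 t htmem
        simp [this]
      rw [hfil]
      decide
    · simp [hp]
  · simp [hb]
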